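-- pv_equiv track=rewrite | github.com/dongwonmoon/coding_test | 프로그래머스/1/155652. 둘만의 암호/둘만의 암호.py | solution
-- ===== SOURCE A (Python) =====
-- def solution(s, skip, index):
--     alphabet = set([chr(x) for x in range(ord("a"), ord("z")+1)])
--     alphabet -= set(skip)
--     alphabet = sorted(list(alphabet))
--     alphabet_dict = {a: i for i, a in enumerate(alphabet)}
--     len_alphabet = len(alphabet)
--
--     answer = []
--     for a in s:
--         answer.append(alphabet[(alphabet_dict[a]+index) % len_alphabet])
--
--     return "".join(answer)
-- ===== SOURCE B (Python) =====
-- def solution(s, skip, index):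
--     # No alphabet list, set or dict: for each character, find its rank among the
--     # allowed letters by a counting walk, shift the rank, and select the letter of
--     # that rank by a second walk.  Pure rank/select arithmetic over the implicit
--     # alphabet; a character with no rank (not an allowed lowercase letter) has no
--     # encoding -> KeyError, as in A.
--     def allowed(x):  # is letter number x (0..25) kept?
--         return chr(97 + x) not in skip
--     n = sum(1 for x in range(26) if allowed(x))
--     out = []
--     for c in s:
--         r = 0                        # rank of c among the allowed letters
--         for x in range(26):
--             if allowed(x):
--                 if 97 + x == ord(c):
--                     break
--                 r += 1
--         else:
--             raise KeyError(c)
--         r = (r + index) % n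
--         for x in range(26):          # select the letter of rank r
--             if allowed(x):
--                 if r == 0:
--                     out.append(chr(97 + x))
--                     break
--                 r -= 1
--     return "".join(out)
-- ===== Notes on version B (the rewrite author's own statement) =====
-- stated objective: alternative
-- what changed: B builds no alphabet list, no set and no dict: for each character it finds its rank among the allowed letters by a counting walk over the implicit alphabet, shifts the rank, and recovers the output letter by a select walk of that rank (rank/select arithmetic instead of A's sorted list + index dict).
import Mathlib
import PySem

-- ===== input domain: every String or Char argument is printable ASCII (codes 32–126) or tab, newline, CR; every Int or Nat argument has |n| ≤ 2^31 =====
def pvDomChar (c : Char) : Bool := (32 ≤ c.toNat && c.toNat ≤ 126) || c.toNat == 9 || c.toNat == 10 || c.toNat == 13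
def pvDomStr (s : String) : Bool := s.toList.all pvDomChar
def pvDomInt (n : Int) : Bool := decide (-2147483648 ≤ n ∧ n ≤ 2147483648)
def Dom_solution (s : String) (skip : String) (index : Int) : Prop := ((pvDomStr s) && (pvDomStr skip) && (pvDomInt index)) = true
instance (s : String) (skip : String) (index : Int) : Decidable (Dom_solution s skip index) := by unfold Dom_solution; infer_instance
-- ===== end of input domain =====

-- B keeps no alphabet list, set or dict at all: it computes each character's rank among the
-- allowed letters by counting, shifts it, and selects the output letter by a walk — pure
-- rank/select arithmetic instead of A's sorted list + index dict.

-- ===== PORT A =====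
def solution (s : String) (skip : String) (index : Int) : String :=
  let alphabet0 : PySem.Set Char :=
    PySem.Set.ofList ((PySem.List.pyRange 97 123 1).map (fun x => Char.ofNat x.toNat))
  let alphabet1 : PySem.Set Char := PySem.Set.diff alphabet0 (PySem.Set.ofList skip.toList)
  let alphabet : List Char := PySem.List.sorted alphabet1 (fun c => c) false
  let alphabetDict : PySem.Dict Char Int :=
    (PySem.List.enumerate alphabet 0).foldl (fun d p => d.insert p.2 p.1) PySem.Dict.empty
  let lenAlphabet : Int := alphabet.length
  -- alphabet_dict[a] raises KeyError outside Pre_; the port returns '?' there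
  let answer : List Char := s.toList.foldl (fun acc a =>
    acc ++ [((alphabetDict.get? a).bind
              (fun i => PySem.List.pyGet? alphabet (PySem.Int.mod (i + index) lenAlphabet))).getD '?']) []
  String.mk answer

-- ===== PORT B =====
-- Source B's allowed(x): is letter number x (0..25) kept?
def altAllowed (skip : String) (x : Int) : Bool :=
  !(skip.toList.contains (Char.ofNat (97 + x).toNat))

-- Source B's rank loop: walk the letters counting allowed ones until c is met; none = for-else KeyError
def altRank (skip : String) (c : Char) (r : Int) : List Int → Option Int
  | [] => none
  | x :: t =>
    if altAllowed skip x then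
      if 97 + x = (c.toNat : Int) then some r else altRank skip c (r + 1) t
    else altRank skip c r t

-- Source B's inner select loop: walk the letters, decrementing r on allowed ones; none = no break hit
def altSelect (skip : String) (r : Int) : List Int → Option Char
  | [] => none
  | x :: t =>
    if altAllowed skip x then
      if r = 0 then some (Char.ofNat (97 + x).toNat) else altSelect skip (r - 1) t
    else altSelect skip r t

def solution_alt (s : String) (skip : String) (index : Int) : String :=
  let n : Int := ((PySem.List.pyRange 0 26 1).countP (altAllowed skip) : Nat)
  -- the rank walk's for-else raises KeyError outside Pre_; the port appends nothing there
  let out : List Char := s.toList.foldl (fun acc c =>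
    acc ++ ((altRank skip c 0 (PySem.List.pyRange 0 26 1)).bind (fun r =>
      altSelect skip (PySem.Int.mod (r + index) n) (PySem.List.pyRange 0 26 1))).toList) []
  String.mk out

-- ===== PRECONDITION & SPEC =====
-- Pre_ excludes exactly the inputs where Python A raises: a character of s that is not a
-- lowercase letter, or is listed in skip, hits alphabet_dict[a] with a KeyError.
def Pre_solution (s : String) (skip : String) (index : Int) : Prop :=
  s.toList.all (fun c => 'a' ≤ c && c ≤ 'z' && !(skip.toList.contains c)) = true
instance (s : String) (skip : String) (index : Int) : Decidable (Pre_solution s skip index) := by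
  unfold Pre_solution; infer_instance
def pvWitness_solution : String × String × Int := ("bcdz", "a", 5)
def Spec_solution (s : String) (skip : String) (index : Int) (out : String) : Prop :=
  out = solution_alt s skip index
instance (s : String) (skip : String) (index : Int) (out : String) : Decidable (Spec_solution s skip index out) := by unfold Spec_solution; infer_instance

-- ===== CLAIM (what is proved, stated in full; the proofs are below) =====
def Claim_equal_solution : Prop := ∀ (s : String) (skip : String) (index : Int), Dom_solution s skip index → Pre_solution s skip index → Spec_solution s skip index (solution s skip index)

-- ===== LEMMAS AND PROOFS =====

-- letter number x as a character (Source B's chr(97 + x))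
def pvToC (x : Int) : Char := Char.ofNat (97 + x).toNat

def pvAz : List Char := "abcdefghijklmnopqrstuvwxyz".toList

-- A's sorted(set(a..z) - set(skip)) is the filter of the ordered literal a..z.
theorem alphabet_eq (skip : String) :
    PySem.List.sorted
      (PySem.Set.diff
        (PySem.Set.ofList ((PySem.List.pyRange 97 123 1).map (fun x => Char.ofNat x.toNat)))
        (PySem.Set.ofList skip.toList)) (fun c => c) false
    = pvAz.filter (fun c => !(skip.toList.contains c)) := by
  have haz : PySem.Set.ofList ((PySem.List.pyRange 97 123 1).map (fun x => Char.ofNat x.toNat))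
      = pvAz := by decide
  rw [haz]
  have hnodup : pvAz.Nodup := by decide
  have hsorted : pvAz.Pairwise (· < ·) := by decide
  apply PySem.List.sorted_eq_of_perm_of_pairwise_lt
  · apply (List.perm_ext_iff_of_nodup (List.Nodup.filter _ hnodup) (PySem.Set.nodup_diff _ _ hnodup)).mpr
    intro c
    simp [PySem.Set.mem_diff, PySem.Set.mem_ofList, List.mem_filter]
  · exact List.Pairwise.filter _ hsorted

-- B's filtered letter numbers, mapped to characters, are the same filtered alphabet.
theorem filtered_eq (skip : String) :
    ((PySem.List.pyRange 0 26 1).filter (altAllowed skip)).map pvToC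
    = pvAz.filter (fun c => !(skip.toList.contains c)) := by
  have hmap : (PySem.List.pyRange 0 26 1).map pvToC = pvAz := by decide
  rw [← hmap, List.filter_map]
  rfl

-- get? of a dict built by folding insert over pairs with distinct keys is find?.
theorem foldl_insert_get? {ν : Type} (l : List (Int × Char)) (f : Int × Char → ν)
    (d : PySem.Dict Char ν) (c : Char) (hk : (l.map (·.2)).Nodup) :
    ((l.foldl (fun d p => d.insert p.2 (f p)) d).get? c)
      = match l.find? (fun p => p.2 == c) with
        | some p => some (f p)
        | none => d.get? c := by
  induction l generalizing d with
  | nil => simp [List.foldl]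
  | cons p t ih =>
    simp only [List.map_cons, List.nodup_cons] at hk
    by_cases h : p.2 = c
    · subst h
      simp only [List.foldl_cons, List.find?_cons, beq_self_eq_true]
      rw [ih _ hk.2]
      have hnone : t.find? (fun q => q.2 == p.2) = none := by
        rw [List.find?_eq_none]
        intro q hq
        simp only [beq_iff_eq]
        intro hqe
        exact hk.1 (hqe ▸ List.mem_map_of_mem hq)
      rw [hnone]
      simp [PySem.Dict.get?_insert_self]
    · simp only [List.foldl_cons, List.find?_cons]
      have : (p.2 == c) = false := by simp [h]
      rw [this]
      simp only []
      rw [ih _ hk.2]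
      cases t.find? (fun q => q.2 == c) with
      | some q => rfl
      | none => exact PySem.Dict.get?_insert_of_ne d (f p) (Ne.symm h)

-- find? over enumerate returns the first index of a member.
theorem find_enumerate (l : List Char) (a : Char) (j : Int) (h : a ∈ l) :
    (PySem.List.enumerate l j).find? (fun p => p.2 == a) = some (j + (l.idxOf a : Int), a) := by
  induction l generalizing j with
  | nil => cases h
  | cons b t ih =>
    rw [PySem.List.enumerate_cons, List.find?_cons]
    by_cases hb : b = a
    · subst hb
      simp [List.idxOf_cons_self]
    · have hba : (b == a) = false := by simp [hb]
      rw [hba]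
      simp only []
      have ha : a ∈ t := by cases h with | head => exact absurd rfl hb | tail _ h => exact h
      rw [ih (j + 1) ha, List.idxOf_cons_ne _ hb]
      congr 1
      push_cast
      ring_nf

-- Source B's select loop is indexing into the filtered letters, mapped to characters.
theorem select_eq (skip : String) (r : Int) (l : List Int) (h : 0 ≤ r) :
    altSelect skip r l = ((l.filter (altAllowed skip)).map pvToC)[r.toNat]? := by
  induction l generalizing r with
  | nil => simp [altSelect]
  | cons x t ih =>
    rw [altSelect]
    by_cases ha : altAllowed skip x
    · rw [if_pos ha, List.filter_cons_of_pos ha, List.map_cons]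
      by_cases hr : r = 0
      · subst hr; rfl
      · rw [if_neg hr, ih (r - 1) (by omega)]
        have hts : r.toNat = (r - 1).toNat + 1 := by omega
        rw [hts, List.getElem?_cons_succ]
    · rw [if_neg ha, List.filter_cons_of_neg ha]
      exact ih r h

-- Char order in terms of codepoints.
theorem char_le_iff (c d : Char) : c ≤ d ↔ c.toNat ≤ d.toNat := by
  rw [Char.le_def]; exact UInt32.le_iff_toNat_le
theorem toNat_ofNat (m : Nat) (h1 : 97 ≤ m) (h2 : m ≤ 122) : (Char.ofNat m).toNat = m := by
  have hv : m.isValidChar := Or.inl (by omega)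
  rw [Char.ofNat, dif_pos hv]
  simp [Char.toNat, Char.ofNatAux]

theorem char_eq_of_toNat (c d : Char) (h : c.toNat = d.toNat) : c = d := by
  apply Char.ext
  exact UInt32.toNat_inj.mp h

-- Source B's rank walk is the index of c in the filtered letters, mapped to characters.
theorem rank_eq (skip : String) (c : Char) (l : List Int) (r : Int)
    (hl : ∀ x ∈ l, 0 ≤ x ∧ x < 26)
    (hmem : c ∈ (l.filter (altAllowed skip)).map pvToC) :
    altRank skip c r l = some (r + (((l.filter (altAllowed skip)).map pvToC).idxOf c : Int)) := by
  induction l generalizing r with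
  | nil => simp at hmem
  | cons x t ih =>
    have hx := hl x List.mem_cons_self
    have hlt : ∀ y ∈ t, 0 ≤ y ∧ y < 26 := fun y hy => hl y (List.mem_cons_of_mem _ hy)
    have htc : (pvToC x).toNat = (97 + x).toNat := toNat_ofNat _ (by omega) (by omega)
    rw [altRank]
    by_cases ha : altAllowed skip x
    · rw [List.filter_cons_of_pos ha, List.map_cons] at hmem ⊢
      rw [if_pos ha]
      by_cases he : 97 + x = (c.toNat : Int)
      · have hpc : pvToC x = c := char_eq_of_toNat _ _ (by omega)
        rw [if_pos he, hpc, List.idxOf_cons_self]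
        simp
      · have hpc : pvToC x ≠ c := by
          intro hcon
          exact he (by rw [← hcon]; omega)
        have hmem' : c ∈ (t.filter (altAllowed skip)).map pvToC := by
          cases hmem with
          | head => exact absurd rfl hpc
          | tail _ h => exact h
        rw [if_neg he, ih (r + 1) hlt hmem', List.idxOf_cons_ne _ hpc]
        congr 1
        push_cast
        ring_nf
    · rw [List.filter_cons_of_neg ha] at hmem ⊢
      rw [if_neg ha]
      exact ih r hlt hmem

theorem mem_az (c : Char) (h1 : 97 ≤ c.toNat) (h2 : c.toNat ≤ 122) : c ∈ pvAz := by
  have hco : c = Char.ofNat c.toNat := (Char.ofNat_toNat c).symm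
  rw [hco]
  interval_cases h : c.toNat <;> decide

-- the per-character agreement: under Pre_'s conditions on c, A's table lookup and
-- B's count-shift-select produce the same (defined) letter.
theorem char_core (skip : String) (index : Int) (c : Char)
    (h1 : 97 ≤ c.toNat) (h2 : c.toNat ≤ 122) (h3 : skip.toList.contains c = false) :
    ∃ v : Char,
      ((((PySem.List.enumerate (pvAz.filter (fun d => !(skip.toList.contains d))) 0).foldl
          (fun d p => d.insert p.2 p.1) PySem.Dict.empty).get? c).bind
        (fun i => PySem.List.pyGet? (pvAz.filter (fun d => !(skip.toList.contains d)))
          (PySem.Int.mod (i + index) ((pvAz.filter (fun d => !(skip.toList.contains d))).length : Int)))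
        = some v)
      ∧ (((altRank skip c 0 (PySem.List.pyRange 0 26 1)).bind (fun r =>
            altSelect skip
              (PySem.Int.mod (r + index)
                (((PySem.List.pyRange 0 26 1).countP (altAllowed skip) : Nat) : Int))
              (PySem.List.pyRange 0 26 1)))
        = some v) := by
  set al := pvAz.filter (fun d => !(skip.toList.contains d)) with hal
  have hmem : c ∈ al := by
    rw [hal, List.mem_filter]
    exact ⟨mem_az c h1 h2, by simpa using h3⟩
  have hnodup : al.Nodup := List.Nodup.filter _ (by decide)
  have hsorted : al.Pairwise (· < ·) := List.Pairwise.filter _ (by decide)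
  set k := al.idxOf c with hk
  have hklt : k < al.length := List.idxOf_lt_length_of_mem hmem
  have hget : al[k] = c := List.getElem_idxOf hklt
  have hkeys : ((PySem.List.enumerate al 0).map (·.2)).Nodup := by
    rw [PySem.List.map_snd_enumerate]; exact hnodup
  -- n agrees
  have hn : ((PySem.List.pyRange 0 26 1).countP (altAllowed skip)) = al.length := by
    rw [hal, ← filtered_eq, List.length_map, List.countP_eq_length_filter]
  -- rank agrees: B's walk finds k
  have hrank : altRank skip c 0 (PySem.List.pyRange 0 26 1) = some (k : Int) := by
    have hl : ∀ x ∈ PySem.List.pyRange 0 26 1, 0 ≤ x ∧ x < 26 := by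
      intro x hx
      rw [PySem.List.mem_pyRange_one] at hx
      omega
    have hmem' : c ∈ ((PySem.List.pyRange 0 26 1).filter (altAllowed skip)).map pvToC := by
      rw [filtered_eq, ← hal]; exact hmem
    rw [rank_eq skip c _ 0 hl hmem']
    rw [show (((PySem.List.pyRange 0 26 1).filter (altAllowed skip)).map pvToC).idxOf c = k by
      rw [filtered_eq, ← hal, hk]]
    simp
  -- both sides index al at mod (k + index) al.length
  have hpos : (0 : Int) < (al.length : Int) := by
    have := List.length_pos_of_ne_nil (List.ne_nil_of_mem hmem)
    exact_mod_cast this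
  have h0 : (0 : Int) ≤ PySem.Int.mod ((k : Int) + index) (al.length : Int) :=
    PySem.Int.mod_nonneg _ hpos
  have hlt : PySem.Int.mod ((k : Int) + index) (al.length : Int) < (al.length : Int) :=
    PySem.Int.mod_lt _ hpos
  have hltn : (PySem.Int.mod ((k : Int) + index) (al.length : Int)).toNat < al.length := by
    omega
  refine ⟨al[(PySem.Int.mod ((k : Int) + index) (al.length : Int)).toNat], ?_, ?_⟩
  · rw [foldl_insert_get? _ _ _ _ hkeys, find_enumerate al c 0 hmem, ← hk]
    simp only [zero_add, Option.bind]
    exact PySem.List.pyGet?_eq_some_getElem _ h0 (by exact_mod_cast hlt)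
  · rw [hrank, hn]
    simp only [Option.bind]
    rw [select_eq skip _ _ h0, filtered_eq, ← hal]
    exact List.getElem?_eq_getElem hltn

theorem solution_spec' (s skip : String) (index : Int)
    (hpre : Pre_solution s skip index) :
    solution s skip index = solution_alt s skip index := by
  simp only [solution, solution_alt]
  rw [alphabet_eq]
  congr 1
  rw [PySem.List.foldl_append_singleton_eq_map, PySem.List.foldl_append_eq_flatMap,
      List.nil_append, List.nil_append, List.map_eq_flatMap]
  apply List.flatMap_congr
  intro c hc
  unfold Pre_solution at hpre
  rw [List.all_eq_true] at hpre
  have hcp := hpre c hc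
  simp only [Bool.and_eq_true, Bool.not_eq_eq_eq_not, Bool.not_true] at hcp
  have h1 : 97 ≤ c.toNat := (char_le_iff 'a' c).mp (by exact of_decide_eq_true hcp.1.1)
  have h2 : c.toNat ≤ 122 := (char_le_iff c 'z').mp (by exact of_decide_eq_true hcp.1.2)
  obtain ⟨v, hA, hB⟩ := char_core skip index c h1 h2 hcp.2
  rw [hA, hB]
  rfl

-- ===== VERDICT (by name: the statement is the Claim_ definition above) =====
theorem solution_spec : Claim_equal_solution := by
  intro s skip index _ hpre
  unfold Spec_solution
  exact solution_spec' s skip index hpre
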